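-- pv_equiv track=rewrite | github.com/zborilf/FRAg | _dalsi_rozsireni/Misar/Ondra Misar/FRAg/core/MCTS_python/scheduler/base_mcts.py | parse_program_thread
-- ===== SOURCE A (Python) =====
-- def split_top_level_items(text: str) -> list[str]:
--     """
--     Takes in a string that contains all the predicates and splits them by the top level closure
--     :param text: Text that contains multiple predicates
--     :return: List of every predicate
--     """
--     result = []
--     buffer = []
--     depth = 0
--     i = 0
--
--     while i < len(text):
--         char = text[i]
--
--         if char == '(':
--             depth += 1
--         elif char == ')':
--             depth -= 1
--
--         if depth == 0 and text[i:i + 5] in [',fact', ',even', ',plan', ',inte']: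
--             result.append(''.join(buffer))
--             buffer = []
--             i += 1
--             continue
--
--         buffer.append(char)
--         i += 1
--
--     if buffer:
--         result.append(''.join(buffer))
--
--     return result
--
-- def parse_program_thread(program: str, batched_asserts):
--     """
--     Takes in the whole program string and creates an assert query for every predicate.
--     :param program: The program of agent in string format
--     :param batched_asserts: List where should the assert query be stored
--     :return: Number for events and intentions
--     """
--     new = program.strip()[1:-1]
--     new = new.replace(" ", "")
--     splits = split_top_level_items(new)
--     event = 0
--     intention = 0
--     for item in splits:
--         for prefix in ("fact", "event", "plan", "intention"):
--             if item.startswith(prefix):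
--                 match prefix:
--                     case "fact":
--                         if not "reward" in item:
--                             batched_asserts.append(f"assertz(fRAgAgent:{item})")
--                     case "event":
--                         batched_asserts.append(f"assertz(fRAgAgent:{item})")
--                         event += 1
--                     case "plan":
--                         batched_asserts.append(f"assertz(fRAgAgent:{item})")
--                     case "intention":
--                         batched_asserts.append(f"assertz(fRAgAgent:{item})")
--                         intention += 1
--                 break
--
--     return event, intention
-- ===== SOURCE B (Python) =====
-- def parse_program_thread(program, batched_asserts):
--     """Split on commas first, then re-merge fragments by paren depth and marker
--     prefix; classify each completed item once, counting events/intentions."""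
--     new = program.strip()[1:-1].replace(" ", "")
--     counts = {"event": 0, "intention": 0}
--
--     def emit(item):
--         if item.startswith("fact"):
--             if "reward" not in item:
--                 batched_asserts.append(f"assertz(fRAgAgent:{item})")
--         elif item.startswith("event"):
--             batched_asserts.append(f"assertz(fRAgAgent:{item})")
--             counts["event"] += 1
--         elif item.startswith("plan"):
--             batched_asserts.append(f"assertz(fRAgAgent:{item})")
--         elif item.startswith("intention"):
--             batched_asserts.append(f"assertz(fRAgAgent:{item})")
--             counts["intention"] += 1
--
--     frags = new.split(",")
--     item = frags[0]
--     depth = item.count("(") - item.count(")")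
--     for frag in frags[1:]:
--         if depth == 0 and frag.startswith(("fact", "even", "plan", "inte")):
--             emit(item)
--             item = frag
--         else:
--             item = item + "," + frag
--         depth += frag.count("(") - frag.count(")")
--     emit(item)
--     return counts["event"], counts["intention"]
-- ===== Notes on version B (the rewrite author's own statement) =====
-- stated objective: alternative
-- what changed: A scans character by character twice (a depth-tracking split loop building items, then a prefix-classification loop over the items); B splits the string on every comma once, then makes a single merge-and-classify pass over the fragments, re-joining a fragment unless the running paren depth is 0 and it starts with fact/even/plan/inte.
import Mathlib
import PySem

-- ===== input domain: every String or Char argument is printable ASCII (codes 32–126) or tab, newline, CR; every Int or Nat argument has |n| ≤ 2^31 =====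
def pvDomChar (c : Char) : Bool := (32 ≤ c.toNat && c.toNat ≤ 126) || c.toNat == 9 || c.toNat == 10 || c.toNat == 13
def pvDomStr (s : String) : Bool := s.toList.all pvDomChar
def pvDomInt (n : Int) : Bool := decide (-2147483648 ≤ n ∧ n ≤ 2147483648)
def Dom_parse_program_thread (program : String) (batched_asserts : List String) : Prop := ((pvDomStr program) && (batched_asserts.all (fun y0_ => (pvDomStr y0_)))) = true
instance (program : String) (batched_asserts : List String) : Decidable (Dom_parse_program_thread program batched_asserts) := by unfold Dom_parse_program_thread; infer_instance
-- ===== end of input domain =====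

set_option maxRecDepth 8192


-- B replaces A's two passes (per-character top-level split, then a prefix-classification loop)
-- by a comma-split of the string followed by one merge-and-classify pass over the fragments
-- (same O(n); a timing run measured B faster by a constant factor).  Both Pythons append the same assert strings to batched_asserts
-- (the mutation is reproduced by B); the equivalence proved here is about the returned
-- (event, intention) pair; the ports also carry the appended list faithfully in their state.

-- ===== PORT A =====
-- pvAssertA builds f"assertz(fRAgAgent:{item})" (the identical f-string line of both Pythons; also used by port B).
-- items and buffers are carried as List Char (the exact code points of Python's strings);
-- ''.join(buffer) is String.mk buffer.
def pvAssertA (item : List Char) : String := String.ofList (['a', 's', 's', 'e', 'r', 't', 'z', '(', 'f', 'R', 'A', 'g', 'A', 'g', 'e', 'n', 't', ':'] ++ item ++ [')'])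

def pvMarkers : List (List Char) := [[',', 'f', 'a', 'c', 't'], [',', 'e', 'v', 'e', 'n'], [',', 'p', 'l', 'a', 'n'], [',', 'i', 'n', 't', 'e']]

-- while-loop of split_top_level_items: i, buffer, depth, result
def pvSplitAux : List Char → List Char → Int → List (List Char) → List (List Char)
  | [], buffer, _, result => if buffer.isEmpty then result else result ++ [buffer]
  | c :: rest, buffer, depth, result =>
    let depth' := if c = '(' then depth + 1 else if c = ')' then depth - 1 else depth
    if depth' = 0 ∧ (c :: rest).take 5 ∈ pvMarkers then
      pvSplitAux rest [] depth' (result ++ [buffer])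
    else
      pvSplitAux rest (buffer ++ [c]) depth' result

def pvPrefixes : List (List Char) := [['f', 'a', 'c', 't'], ['e', 'v', 'e', 'n', 't'], ['p', 'l', 'a', 'n'], ['i', 'n', 't', 'e', 'n', 't', 'i', 'o', 'n']]

-- 'for prefix in (...): if item.startswith(prefix): match prefix: …; break'
def pvPrefLoop : List (List Char) → List Char → List String × Int × Int → List String × Int × Int
  | [], _, st => st
  | p :: ps, item, st =>
    if PySem.Chars.startswith item p then
      if p = ['f', 'a', 'c', 't'] then
        if PySem.Chars.isIn ['r', 'e', 'w', 'a', 'r', 'd'] item then st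
        else (st.1 ++ [pvAssertA item], st.2.1, st.2.2)
      else if p = ['e', 'v', 'e', 'n', 't'] then (st.1 ++ [pvAssertA item], st.2.1 + 1, st.2.2)
      else if p = ['p', 'l', 'a', 'n'] then (st.1 ++ [pvAssertA item], st.2.1, st.2.2)
      else if p = ['i', 'n', 't', 'e', 'n', 't', 'i', 'o', 'n'] then (st.1 ++ [pvAssertA item], st.2.1, st.2.2 + 1)
      else st
    else pvPrefLoop ps item st

def parse_program_thread (program : String) (batched_asserts : List String) : Int × Int :=
  -- new = program.strip()[1:-1];  new = new.replace(" ", "")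
  let new := PySem.Chars.replace (PySem.List.slice (PySem.Chars.strip program.toList) (some 1) (some (-1))) [' '] []
  let splits := pvSplitAux new [] 0 []
  let st := splits.foldl (fun st item => pvPrefLoop pvPrefixes item st) (batched_asserts, 0, 0)
  (st.2.1, st.2.2)

-- ===== PORT B =====
-- emit(item): the if/elif classification chain of Source B
def pvEmit (st : List String × Int × Int) (item : List Char) : List String × Int × Int :=
  if PySem.Chars.startswith item ['f', 'a', 'c', 't'] then
    if PySem.Chars.isIn ['r', 'e', 'w', 'a', 'r', 'd'] item then st
    else (st.1 ++ [pvAssertA item], st.2.1, st.2.2)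
  else if PySem.Chars.startswith item ['e', 'v', 'e', 'n', 't'] then (st.1 ++ [pvAssertA item], st.2.1 + 1, st.2.2)
  else if PySem.Chars.startswith item ['p', 'l', 'a', 'n'] then (st.1 ++ [pvAssertA item], st.2.1, st.2.2)
  else if PySem.Chars.startswith item ['i', 'n', 't', 'e', 'n', 't', 'i', 'o', 'n'] then (st.1 ++ [pvAssertA item], st.2.1, st.2.2 + 1)
  else st

-- frag.startswith(("fact", "even", "plan", "inte"))
def pvSplitStarts (f : List Char) : Bool :=
  PySem.Chars.startswith f ['f', 'a', 'c', 't'] || PySem.Chars.startswith f ['e', 'v', 'e', 'n'] ||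
  PySem.Chars.startswith f ['p', 'l', 'a', 'n'] || PySem.Chars.startswith f ['i', 'n', 't', 'e']

-- frag.count("(") - frag.count(")"); str.count of a single character is element count (exact)
def pvNet (f : List Char) : Int := (f.count '(' : Int) - (f.count ')' : Int)

-- 'for frag in frags[1:]: …' carrying (item, depth, state)
def pvBLoop : List (List Char) → List Char → Int → List String × Int × Int → List String × Int × Int
  | [], item, _, st => pvEmit st item
  | f :: fs, item, depth, st =>
    if depth = 0 ∧ pvSplitStarts f then
      pvBLoop fs f (depth + pvNet f) (pvEmit st item)
    else
      pvBLoop fs (item ++ ',' :: f) (depth + pvNet f) st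

def parse_program_thread_alt (program : String) (batched_asserts : List String) : Int × Int :=
  let new := PySem.Chars.replace (PySem.List.slice (PySem.Chars.strip program.toList) (some 1) (some (-1))) [' '] []
  -- new.split(",") : Python's sep-split is List.splitOn (never empty; the [] arm is unreachable)
  match new.splitOn ',' with
  | [] => (0, 0)
  | f :: fs =>
    let st := pvBLoop fs f (pvNet f) (batched_asserts, 0, 0)
    (st.2.1, st.2.2)

-- ===== PRECONDITION & SPEC =====
def Spec_parse_program_thread (program : String) (batched_asserts : List String) (out : Int × Int) : Prop := out = parse_program_thread_alt program batched_asserts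
instance (program : String) (batched_asserts : List String) (out : Int × Int) : Decidable (Spec_parse_program_thread program batched_asserts out) := by unfold Spec_parse_program_thread; infer_instance

-- ===== CLAIM (what is proved, stated in full; the proofs are below) =====
def Claim_equal_parse_program_thread : Prop := ∀ (program : String) (batched_asserts : List String), Dom_parse_program_thread program batched_asserts → Spec_parse_program_thread program batched_asserts (parse_program_thread program batched_asserts)

-- ===== LEMMAS AND PROOFS =====

-- A's classification loop over the four prefixes is exactly B's emit chain.
lemma pvPrefLoop_eq_pvEmit (item : List Char) (st : List String × Int × Int) :
    pvPrefLoop pvPrefixes item st = pvEmit st item := by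
  simp only [pvPrefixes, pvPrefLoop, pvEmit, pvAssertA, pvAssertA]
  split_ifs <;> first | rfl | simp_all

-- accumulator lemma for A's result list
lemma pvSplitAux_acc (cs : List Char) : ∀ (buf : List Char) (depth : Int) (res : List (List Char)),
    pvSplitAux cs buf depth res = res ++ pvSplitAux cs buf depth [] := by
  induction cs with
  | nil => intro buf depth res; by_cases h : buf.isEmpty <;> simp [pvSplitAux, h]
  | cons c rest ih =>
    intro buf depth res
    simp only [pvSplitAux]
    split_ifs <;>
      first
        | (rw [ih _ _ (res ++ [buf]), ih _ _ ([] ++ [buf])]; simp)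
        | exact ih _ _ _

-- head of a comma-split is the longest comma-free prefix
lemma headI_splitOn_comma (l : List Char) :
    (l.splitOn ',').headI = l.takeWhile (fun a => a != ',') := by
  induction l with
  | nil => rfl
  | cons x l ih =>
    by_cases hx : x = ','
    · subst hx
      simp [List.splitOn, List.splitOnP_cons, List.takeWhile]
    · have hne : l.splitOnP (· == ',') ≠ [] := List.splitOnP_ne_nil _ l
      cases h : l.splitOnP (· == ',') with
      | nil => exact absurd h hne
      | cons f fs =>
        have ih' : f = l.takeWhile (fun a => a != ',') := by
          have h2 := ih
          rw [List.splitOn, h] at h2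
          simpa using h2
        have hxt : (x != ',') = true := by simp [hx]
        simp [List.splitOn, List.splitOnP_cons, hx, h, List.takeWhile, ih', hxt]

lemma prefix_takeWhile_iff {q : Char → Bool} (p : List Char) (hp : ∀ a ∈ p, q a) :
    ∀ l : List Char, (p <+: l.takeWhile q ↔ p <+: l) := by
  induction p with
  | nil => intro l; simp
  | cons x p ih =>
    intro l
    cases l with
    | nil => simp [List.takeWhile]
    | cons y l =>
      by_cases hy : q y
      · simp only [List.takeWhile, hy, List.cons_prefix_cons]
        exact and_congr_right fun _ => ih (fun a ha => hp a (List.mem_cons_of_mem _ ha)) l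
      · constructor
        · intro h
          have := h.length_le
          simp [List.takeWhile, hy] at this
        · intro h
          rcases List.cons_prefix_cons.1 h with ⟨rfl, -⟩
          exact absurd (hp x (List.mem_cons_self ..)) hy

-- the marker test at a top-level comma equals B's prefix test on the next fragment
lemma pvSplitStarts_headI (l : List Char) :
    (pvSplitStarts ((l.splitOn ',').headI) = true) ↔
      (l.take 4 = ['f', 'a', 'c', 't'] ∨ l.take 4 = ['e', 'v', 'e', 'n'] ∨
       l.take 4 = ['p', 'l', 'a', 'n'] ∨ l.take 4 = ['i', 'n', 't', 'e']) := by
  have key : ∀ p : List Char, p.length = 4 → (∀ a ∈ p, (a != ',') = true) →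
      (PySem.Chars.startswith ((l.splitOn ',').headI) p = true ↔ l.take 4 = p) := by
    intro p hlen hp
    rw [PySem.Chars.startswith_iff, headI_splitOn_comma, prefix_takeWhile_iff p hp l,
      List.prefix_iff_eq_take, hlen, eq_comm]
  simp only [pvSplitStarts, Bool.or_eq_true]
  rw [key ['f', 'a', 'c', 't'] (by rfl) (by intro a ha; fin_cases ha <;> rfl), key ['e', 'v', 'e', 'n'] (by rfl) (by intro a ha; fin_cases ha <;> rfl),
    key ['p', 'l', 'a', 'n'] (by rfl) (by intro a ha; fin_cases ha <;> rfl), key ['i', 'n', 't', 'e'] (by rfl) (by intro a ha; fin_cases ha <;> rfl)]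
  tauto

lemma pvNet_cons (c : Char) (f : List Char) :
    pvNet (c :: f) = (if c = '(' then (1:Int) else if c = ')' then -1 else 0) + pvNet f := by
  simp only [pvNet, List.count_cons]
  by_cases h1 : c = '(' <;> by_cases h2 : c = ')' <;>
    simp [h1, h2, beq_iff_eq] at * <;> ring

lemma pvEmit_nil (st : List String × Int × Int) : pvEmit st [] = st := by
  simp [pvEmit, PySem.Chars.startswith, List.isPrefixOf]

-- the main fusion lemma: folding B's emit over A's split list is B's merge loop
lemma pvMain (cs : List Char) : ∀ (buf : List Char) (depth : Int) (st : List String × Int × Int),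
    (pvSplitAux cs buf depth []).foldl pvEmit st
      = pvBLoop (cs.splitOn ',').tail (buf ++ (cs.splitOn ',').headI)
          (depth + pvNet ((cs.splitOn ',').headI)) st := by
  induction cs with
  | nil =>
    intro buf depth st
    by_cases h : buf.isEmpty
    · rw [List.isEmpty_iff] at h
      subst h
      simp [pvSplitAux, List.splitOn, List.splitOnP_nil, pvBLoop, pvEmit_nil, pvNet]
    · simp [pvSplitAux, h, List.splitOn, List.splitOnP_nil, pvBLoop, pvNet]
  | cons c rest ih =>
    intro buf depth st
    obtain ⟨f0, fs, hsp⟩ : ∃ f0 fs, rest.splitOn ',' = f0 :: fs := by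
      cases h : rest.splitOn ',' with
      | nil => exact absurd h (List.splitOnP_ne_nil _ rest)
      | cons f fs => exact ⟨f, fs, rfl⟩
    have hhead : (rest.splitOn ',').headI = f0 := by rw [hsp]; rfl
    by_cases hc : c = ','
    · subst hc
      have hsplit : ((',' : Char) :: rest).splitOn ',' = [] :: rest.splitOn ',' := by
        simp [List.splitOn, List.splitOnP_cons]
      have hdep : (if (',' : Char) = '(' then depth + 1 else if (',' : Char) = ')' then depth - 1 else depth) = depth := by
        simp
      have hstarts := (pvSplitStarts_headI rest)
      rw [hhead] at hstarts
      have hcond : (((',' : Char) :: rest).take 5 ∈ pvMarkers) ↔ pvSplitStarts f0 = true := by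
        rw [hstarts, show ((',' : Char) :: rest).take 5 = ',' :: rest.take 4 from rfl]
        simp only [pvMarkers, List.mem_cons, List.not_mem_nil, or_false, List.cons.injEq,
          true_and]
      simp only [pvSplitAux, hdep, hsplit, List.tail_cons, List.headI, pvNet, List.count_nil,
        List.append_nil, Nat.cast_zero, sub_zero, add_zero]
      rw [hsp]
      simp only [pvBLoop]
      by_cases hA : depth = 0 ∧ ((',' : Char) :: rest).take 5 ∈ pvMarkers
      · rw [if_pos hA, if_pos ⟨hA.1, hcond.1 hA.2⟩]
        rw [pvSplitAux_acc, List.foldl_append]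
        simp only [List.nil_append, List.foldl_cons, List.foldl_nil]
        rw [ih [] depth (pvEmit st buf), hsp]
        simp
      · rw [if_neg hA, if_neg (by rw [hcond] at hA; exact hA)]
        rw [ih (buf ++ [',']) depth st, hsp]
        simp
    · have hsplit : ((c : Char) :: rest).splitOn ',' = (c :: f0) :: fs := by
        simp only [List.splitOn, List.splitOnP_cons] at hsp ⊢
        simp [hc, hsp]
      have hnot : ¬ (((c : Char) :: rest).take 5 ∈ pvMarkers) := by
        rw [show ((c : Char) :: rest).take 5 = c :: rest.take 4 from rfl]
        simp only [pvMarkers, List.mem_cons, List.not_mem_nil, or_false, List.cons.injEq]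
        intro h
        rcases h with ⟨h, -⟩ | ⟨h, -⟩ | ⟨h, -⟩ | ⟨h, -⟩ <;> exact hc h
      simp only [pvSplitAux]
      rw [if_neg (by intro h; exact hnot h.2)]
      rw [ih (buf ++ [c]) _ st, hsp, hsplit]
      simp only [List.tail_cons, List.headI, pvNet_cons]
      have harr : buf ++ [c] ++ f0 = buf ++ c :: f0 := by simp
      rw [harr]
      by_cases h1 : c = '(' <;> by_cases h2 : c = ')' <;> simp [h1, h2] <;> ring_nf
-- ===== VERDICT (by name: the statement is the Claim_ definition above) =====
theorem parse_program_thread_spec : Claim_equal_parse_program_thread := by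
  unfold Claim_equal_parse_program_thread
  intro program batched_asserts _
  unfold Spec_parse_program_thread parse_program_thread parse_program_thread_alt
  have hfold : (fun (st : List String × Int × Int) (item : List Char) => pvPrefLoop pvPrefixes item st) = pvEmit := by
    funext st item
    exact pvPrefLoop_eq_pvEmit item st
  simp only [hfold]
  set new := PySem.Chars.replace (PySem.List.slice (PySem.Chars.strip program.toList) (some 1) (some (-1))) [' '] [] with hnew
  obtain ⟨f0, fs, hsp⟩ : ∃ f0 fs, new.splitOn ',' = f0 :: fs := by
    cases h : new.splitOn ',' with
    | nil => exact absurd h (List.splitOnP_ne_nil _ new)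
    | cons f fs => exact ⟨f, fs, rfl⟩
  rw [pvMain new [] 0 (batched_asserts, 0, 0), hsp]
  simp
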